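-- pv_equiv track=rewrite | github.com/pragnakalpdev85/Python-Practice-questions | combined_topic/practice.py | format_punctuation_spacing
-- ===== SOURCE A (Python) =====
-- def format_punctuation_spacing(file_data: str) -> str:
--     ans = ""
--     index = 0
--     size = 0
--
--     for _ in file_data:
--         size += 1
--
--     while index < size:
--         ch = file_data[index]
--
--         if ch == '.' or ch == ',' or ch == '?' or ch == '!' or ch == ';' or ch == ':':
--             ans += ch
--             if index + 1 < size and file_data[index + 1] != ' ':
--                 ans += ' '
--         else:
--             ans += ch
--
--         index += 1
--
--     return ans
-- ===== SOURCE B (Python) =====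
-- PUNCT = '.,?!;:'
--
-- def format_punctuation_spacing(file_data: str) -> str:
--     # Staged global rewrites: for each mark, insert a space after every occurrence,
--     # then collapse the inserted space where the original already had one; finally
--     # drop the lone trailing space that the insert stage adds when the text ends
--     # with a punctuation mark.
--     s = file_data
--     for p in PUNCT:
--         s = s.replace(p, p + ' ').replace(p + '  ', p + ' ')
--     if file_data[-1:] in PUNCT:
--         s = s[:-1]
--     return s
-- ===== Notes on version B (the rewrite author's own statement) =====
-- stated objective: faster
-- what changed: Replaces the per-character index loop with staged whole-string rewriting: for each of the six marks, one replace inserts a space after every occurrence and a second replace collapses it where the original already had a space, with a final trailing-space drop when the text ends in a mark.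
import Mathlib
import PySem

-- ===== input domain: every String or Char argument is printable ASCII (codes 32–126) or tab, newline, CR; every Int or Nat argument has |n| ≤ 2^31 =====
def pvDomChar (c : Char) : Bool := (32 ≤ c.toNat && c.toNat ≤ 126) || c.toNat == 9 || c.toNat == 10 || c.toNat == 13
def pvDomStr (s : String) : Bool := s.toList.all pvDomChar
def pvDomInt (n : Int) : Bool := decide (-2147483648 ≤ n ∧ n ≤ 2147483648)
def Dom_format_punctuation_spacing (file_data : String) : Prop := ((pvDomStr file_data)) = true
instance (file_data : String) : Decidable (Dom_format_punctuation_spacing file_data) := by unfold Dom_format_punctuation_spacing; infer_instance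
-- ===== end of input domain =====

-- B replaces A's per-character index loop by staged whole-string rewriting: for each of the
-- six marks, one replace inserts a space after every occurrence and a second replace collapses
-- it where the original already had one, plus a final trailing-space drop (same return value).


-- ===== PORT A =====
-- A: counts the size with a for-loop, then an index while-loop building ans by concatenation.
def pvIsPunct (c : Char) : Bool :=
  c == '.' || c == ',' || c == '?' || c == '!' || c == ';' || c == ':'

-- cs.getD index ' ' is exact here: the loop only reads indices with index < size = cs.length
def pvAGo (cs : List Char) (size index : Nat) (ans : List Char) : List Char :=
  if index < size then
    let ch := cs.getD index ' '
    let ans' :=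
      if pvIsPunct ch then
        let ans1 := ans ++ [ch]
        if index + 1 < size && cs.getD (index + 1) ' ' != ' ' then ans1 ++ [' '] else ans1
      else ans ++ [ch]
    pvAGo cs size (index + 1) ans'
  else ans
termination_by size - index

def format_punctuation_spacing (file_data : String) : String :=
  let cs := file_data.toList
  let size := cs.foldl (fun n _ => n + 1) 0
  String.mk (pvAGo cs size 0 [])

-- ===== PORT B =====
-- B: for each mark p, s.replace(p, p+' ').replace(p+'  ', p+' '), then drop the trailing
-- space when the original text ends with a mark ('' in PUNCT is True, s[:-1] of '' is '').
def pvPunct : List Char := ['.', ',', '?', '!', ';', ':']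

def format_punctuation_spacing_alt (file_data : String) : String :=
  let cs := file_data.toList
  let t := pvPunct.foldl (fun s p =>
    PySem.Chars.replace (PySem.Chars.replace s [p] [p, ' ']) [p, ' ', ' '] [p, ' ']) cs
  let t' := if PySem.Chars.isIn (PySem.List.slice cs (some (-1)) none) pvPunct
            then PySem.List.slice t none (some (-1)) else t
  String.mk t'

-- ===== PRECONDITION & SPEC =====
def Spec_format_punctuation_spacing (file_data : String) (out : String) : Prop := out = format_punctuation_spacing_alt file_data
instance (file_data : String) (out : String) : Decidable (Spec_format_punctuation_spacing file_data out) := by unfold Spec_format_punctuation_spacing; infer_instance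

-- ===== CLAIM (what is proved, stated in full; the proofs are below) =====
def Claim_equal_format_punctuation_spacing : Prop := ∀ (file_data : String), Dom_format_punctuation_spacing file_data → Spec_format_punctuation_spacing file_data (format_punctuation_spacing file_data)

-- ===== LEMMAS AND PROOFS =====

-- insert a space after every P-char followed by a non-space (no insertion at end of string):
-- this is what A computes with P = pvIsPunct
def pvIns (P : Char → Bool) : List Char → List Char
  | [] => []
  | [c] => [c]
  | c :: n :: rest => (if P c && n != ' ' then [c, ' '] else [c]) ++ pvIns P (n :: rest)

-- same, but a trailing P-char also gets a space: this is what one insert+collapse pass does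
def pvE (P : Char → Bool) : List Char → List Char
  | [] => []
  | [c] => if P c then [c, ' '] else [c]
  | c :: n :: rest => (if P c && n != ' ' then [c, ' '] else [c]) ++ pvE P (n :: rest)

-- s.replace(p, p+' ') viewed pointwise
def pvFlat (p : Char) (cs : List Char) : List Char :=
  cs.flatMap (fun c => if c == p then [c, ' '] else [c])

lemma pvE_cons_false {P : Char → Bool} {c : Char} (h : P c = false) (t : List Char) :
    pvE P (c :: t) = c :: pvE P t := by
  cases t <;> simp [pvE, h]

-- fuelled, accumulator-free rendering of PySem.Chars.replace.go
def pvRepF (old new : List Char) : Nat → List Char → List Char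
  | 0, l => l
  | _ + 1, [] => []
  | f + 1, c :: t =>
      if old.isPrefixOf (c :: t) then new ++ pvRepF old new f ((c :: t).drop old.length)
      else c :: pvRepF old new f t

lemma pvGo_eq_repF (old new : List Char) (f : Nat) :
    ∀ (l acc : List Char), PySem.Chars.replace.go old new f l acc = acc.reverse ++ pvRepF old new f l := by
  induction f with
  | zero => intro l acc; rw [PySem.Chars.replace.go]; rfl
  | succ k ih =>
    intro l acc
    cases l with
    | nil => rw [PySem.Chars.replace.go]; simp [pvRepF]; omega
    | cons c t =>
      rw [PySem.Chars.replace.go]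
      simp only [pvRepF]
      split <;> simp [ih]

lemma pvReplace_eq_repF (cs old new : List Char) (h : old ≠ []) :
    PySem.Chars.replace cs old new = pvRepF old new cs.length cs := by
  rw [PySem.Chars.replace]
  simp [List.isEmpty_iff, h, pvGo_eq_repF]

lemma pvRepF_nil (old new : List Char) (f : Nat) : pvRepF old new f [] = [] := by
  cases f <;> rfl

lemma pvFlat_cons (p c : Char) (t : List Char) :
    pvFlat p (c :: t) = c :: ((if c == p then [' '] else []) ++ pvFlat p t) := by
  by_cases h : c = p <;> simp [pvFlat, h]

-- the insert pass: replace(p, p+' ') = pvFlat p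
lemma pvRepF_ins (p : Char) (cs : List Char) :
    ∀ f, cs.length ≤ f → pvRepF [p] [p, ' '] f cs = pvFlat p cs := by
  induction cs with
  | nil => intro f _; simp [pvRepF_nil, pvFlat]
  | cons c t ih =>
    intro f hf
    cases f with
    | zero => simp at hf
    | succ k =>
      have hk : t.length ≤ k := by simp at hf; omega
      by_cases hc : c = p
      · simp [pvRepF, List.isPrefixOf, hc, ih k hk, pvFlat_cons]
      · simp [pvRepF, List.isPrefixOf, hc, Ne.symm hc, ih k hk, pvFlat_cons]

-- the collapse pass applied to an inserted string: one full insert+collapse = pvE (· == p)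
lemma pvRepF_collapse (p : Char) (hp : p ≠ ' ') :
    ∀ (n : Nat) (cs : List Char) (f : Nat), cs.length ≤ n → (pvFlat p cs).length ≤ f →
      pvRepF [p, ' ', ' '] [p, ' '] f (pvFlat p cs) = pvE (· == p) cs := by
  intro n
  induction n with
  | zero =>
    intro cs f hn _
    have : cs = [] := by cases cs <;> simp_all
    simp [this, pvFlat, pvRepF_nil, pvE]
  | succ m ih =>
    intro cs f hn hf
    cases cs with
    | nil => simp [pvFlat, pvRepF_nil, pvE]
    | cons c rest =>
      by_cases hc : c = p
      · subst hc
        have hflat : pvFlat c (c :: rest) = c :: ' ' :: pvFlat c rest := by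
          simp [pvFlat_cons]
        cases rest with
        | nil =>
          -- "…p" : no third char, no match; two no-match steps
          have h2 : (pvFlat c [c]).length = 2 := by simp [pvFlat]
          obtain ⟨f1, rfl⟩ : ∃ f1, f = f1 + 2 := by
            refine ⟨f - 2, by omega⟩
          simp [pvFlat, pvRepF, List.isPrefixOf, pvRepF_nil, pvE]
        | cons r0 r2 =>
          by_cases hr0 : r0 = ' '
          · -- "p ␣…" : inserted space + original space → pattern matches, one space dropped
            subst hr0
            have hflat2 : pvFlat c (' ' :: r2) = ' ' :: pvFlat c r2 := by
              simp [pvFlat_cons, Ne.symm hp]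
            cases f with
            | zero => simp [hflat, hflat2] at hf
            | succ f1 =>
              have hlen : (pvFlat c r2).length ≤ f1 := by
                simp [hflat, hflat2] at hf; omega
              have hn2 : r2.length ≤ m := by simp at hn; omega
              have hstep : pvRepF [c, ' ', ' '] [c, ' '] (f1 + 1) (c :: ' ' :: ' ' :: pvFlat c r2)
                  = [c, ' '] ++ pvRepF [c, ' ', ' '] [c, ' '] f1 (pvFlat c r2) := by
                simp [pvRepF, List.isPrefixOf]
              rw [hflat, hflat2, hstep, ih r2 f1 hn2 hlen,
                  show pvE (· == c) (c :: ' ' :: r2) = [c] ++ pvE (· == c) (' ' :: r2) by simp [pvE],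
                  pvE_cons_false (P := fun x => x == c) (show ((' ' == c)) = false by simp [Ne.symm hp])]
              simp
          · -- "p x…", x ≠ ␣ : no match at p (third char ≠ ␣) nor at the inserted space
            have hflat2 : pvFlat c (r0 :: r2) = r0 :: ((if r0 == c then [' '] else []) ++ pvFlat c r2) := pvFlat_cons c r0 r2
            obtain ⟨f2, rfl⟩ : ∃ f2, f = f2 + 2 := by
              refine ⟨f - 2, ?_⟩
              simp [hflat, hflat2] at hf
              omega
            have hlen : (pvFlat c (r0 :: r2)).length ≤ f2 := by
              simp [hflat] at hf ⊢; omega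
            have hn2 : (r0 :: r2).length ≤ m := by simp at hn ⊢; omega
            have hpre1 : ([c, ' ', ' ']).isPrefixOf (c :: ' ' :: pvFlat c (r0 :: r2)) = false := by
              simp [hflat2, List.isPrefixOf, Ne.symm hr0]
            have hpre2 : ([c, ' ', ' ']).isPrefixOf (' ' :: pvFlat c (r0 :: r2)) = false := by
              simp [List.isPrefixOf, hp]
            simp only [hflat, pvRepF, hpre1, hpre2, Bool.false_eq_true, if_false]
            simp [ih (r0 :: r2) f2 hn2 hlen, pvE, hr0]
      · -- c ≠ p : one no-match step
        have hflat : pvFlat p (c :: rest) = c :: pvFlat p rest := by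
          simp [pvFlat_cons, hc]
        cases f with
        | zero => simp [hflat] at hf
        | succ f1 =>
          have hlen : (pvFlat p rest).length ≤ f1 := by simp [hflat] at hf; omega
          have hn2 : rest.length ≤ m := by simp at hn; omega
          have hpre : ([p, ' ', ' ']).isPrefixOf (c :: pvFlat p rest) = false := by
            simp [List.isPrefixOf, Ne.symm hc]
          simp only [hflat, pvRepF, hpre, Bool.false_eq_true, if_false]
          rw [ih rest f1 hn2 hlen]
          cases rest with
          | nil => simp [pvE, hc]
          | cons n r => simp [pvE, hc]

-- one insert+collapse pass, as B's Python writes it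
lemma pvPass_eq (p : Char) (hp : p ≠ ' ') (cs : List Char) :
    PySem.Chars.replace (PySem.Chars.replace cs [p] [p, ' ']) [p, ' ', ' '] [p, ' ']
      = pvE (· == p) cs := by
  rw [pvReplace_eq_repF cs [p] [p, ' '] (by simp),
      pvRepF_ins p cs cs.length le_rfl,
      pvReplace_eq_repF _ _ _ (by simp),
      pvRepF_collapse p hp cs.length cs (pvFlat p cs).length le_rfl le_rfl]

-- composing passes: a fresh mark q commutes into the accumulated predicate
lemma pvE_compose (P : Char → Bool) (q : Char) (hq : q ≠ ' ') (hPq : P q = false) :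
    ∀ cs, pvE (· == q) (pvE P cs) = pvE (fun c => P c || c == q) cs := by
  intro cs
  induction cs with
  | nil => simp [pvE]
  | cons c t ih =>
    cases t with
    | nil =>
      by_cases hc : P c
      · have hcq : (c == q) = false := by
          simp; rintro rfl; simp [hc] at hPq
        simp [pvE, hc, hcq, Ne.symm hq]
      · simp only [Bool.not_eq_true] at hc
        by_cases hcq : c = q <;> simp [pvE, hc, hcq, hPq]
    | cons n r =>
      by_cases hcond : (P c && n != ' ') = true
      · obtain ⟨hc, hn⟩ := by simpa using hcond
        have hcq : (c == q) = false := by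
          simp; rintro rfl; simp [hc] at hPq
        have hsq : ((' ' == q)) = false := by simp [Ne.symm hq]
        simp only [pvE, hcond, if_pos, List.cons_append, List.nil_append]
        rw [pvE_cons_false (P := fun x => x == q) hsq, ih]
        simp [hc, hn, hcq]
      · have hE : pvE P (c :: n :: r) = [c] ++ pvE P (n :: r) := by
          simp [pvE, hcond]
        obtain ⟨t', ht'⟩ : ∃ t', pvE P (n :: r) = n :: t' := by
          cases r with
          | nil =>
            by_cases h : P n
            · exact ⟨[' '], by simp [pvE, h]⟩
            · exact ⟨[], by simp [pvE, h]⟩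
          | cons a b =>
            by_cases h : (P n && a != ' ') = true
            · exact ⟨' ' :: pvE P (a :: b), by simp [pvE, h]⟩
            · exact ⟨pvE P (a :: b), by simp [pvE, h]⟩
        rw [ht'] at ih
        by_cases hcq : c = q
        · subst hcq
          rw [hE, List.singleton_append, ht']
          simp only [pvE]
          rw [ih]
          simp [hPq]
        · have hcqb : (c == q) = false := by simp [hcq]
          have hc' : (P c && n != ' ') = false := by simpa using hcond
          rw [hE, List.singleton_append, ht',
              pvE_cons_false (P := fun x => x == q) hcqb, ih]
          simp [pvE, hcqb, hc']

-- pvE = pvIns plus a space after a trailing P-char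
lemma pvE_eq_pvIns (P : Char → Bool) :
    ∀ cs, pvE P cs = pvIns P cs ++
      (match cs.getLast? with | some c => if P c then [' '] else [] | none => []) := by
  intro cs
  induction cs with
  | nil => simp [pvE, pvIns]
  | cons c t ih =>
    cases t with
    | nil => by_cases h : P c <;> simp [pvE, pvIns, h]
    | cons n r =>
      simp only [pvE, pvIns, ih, List.getLast?_cons_cons, List.append_assoc]

lemma pvSizeEq (cs : List Char) : cs.foldl (fun n _ => n + 1) 0 = cs.length := by
  suffices h : ∀ a : Nat, cs.foldl (fun n _ => n + 1) a = a + cs.length by simp [h 0]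
  induction cs with
  | nil => simp
  | cons c t ih => intro a; simp [List.foldl_cons, ih]; omega

-- A's loop computes pvIns pvIsPunct
lemma pvAGo_eq_spec (fuel : Nat) (cs : List Char) (index : Nat) (ans : List Char)
    (hf : cs.length - index = fuel) :
    pvAGo cs cs.length index ans = ans ++ pvIns pvIsPunct (cs.drop index) := by
  induction fuel generalizing index ans with
  | zero =>
    have hge : cs.length ≤ index := by omega
    rw [pvAGo]
    simp [Nat.not_lt.mpr hge, List.drop_eq_nil_of_le hge, pvIns]
  | succ k ih =>
    have hlt : index < cs.length := by omega
    rw [pvAGo]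
    simp only [hlt, if_pos, List.getD_eq_getElem _ _ hlt]
    rw [ih (index + 1) _ (by omega)]
    rw [List.drop_eq_getElem_cons hlt]
    by_cases h2 : index + 1 < cs.length
    · rw [List.drop_eq_getElem_cons h2]
      simp only [List.getD_eq_getElem _ _ h2, h2, decide_true, Bool.true_and, pvIns]
      by_cases hp : pvIsPunct cs[index]
      · simp only [hp, if_pos]
        by_cases hsp : cs[index + 1] != ' ' <;> simp [hsp]
      · simp [hp]
    · have hnil : cs.drop (index + 1) = [] :=
        List.drop_eq_nil_of_le (by omega)
      simp only [hnil, pvIns, h2, decide_false, Bool.false_and, Bool.false_eq_true, if_neg,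
        not_false_eq_true]
      by_cases hp : pvIsPunct cs[index] <;> simp [hp]

-- B's six passes compute pvE pvIsPunct
lemma pvBFold_eq (cs : List Char) :
    pvPunct.foldl (fun s p =>
      PySem.Chars.replace (PySem.Chars.replace s [p] [p, ' ']) [p, ' ', ' '] [p, ' ']) cs
      = pvE pvIsPunct cs := by
  simp only [pvPunct, List.foldl_cons, List.foldl_nil]
  rw [pvPass_eq '.' (by decide), pvPass_eq ',' (by decide), pvPass_eq '?' (by decide),
      pvPass_eq '!' (by decide), pvPass_eq ';' (by decide), pvPass_eq ':' (by decide)]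
  rw [pvE_compose _ ',' (by decide) (by decide),
      pvE_compose _ '?' (by decide) (by decide),
      pvE_compose _ '!' (by decide) (by decide),
      pvE_compose _ ';' (by decide) (by decide),
      pvE_compose _ ':' (by decide) (by decide)]
  have : (fun c => ((((c == '.' || c == ',') || c == '?') || c == '!') || c == ';') || c == ':')
      = pvIsPunct := by
    funext c; simp [pvIsPunct]
  rw [this]

lemma pvMem_punct_iff (c : Char) : c ∈ pvPunct ↔ pvIsPunct c = true := by
  simp [pvPunct, pvIsPunct]; tauto

-- ===== VERDICT (by name: the statement is the Claim_ definition above) =====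
theorem format_punctuation_spacing_spec : Claim_equal_format_punctuation_spacing := by
  intro s _
  unfold Spec_format_punctuation_spacing format_punctuation_spacing format_punctuation_spacing_alt
  simp only [pvSizeEq, pvBFold_eq, PySem.List.slice_to_neg_one]
  rw [pvAGo_eq_spec s.toList.length s.toList 0 [] rfl, List.drop_zero]
  rcases List.eq_nil_or_concat s.toList with hnil | ⟨ys, c, hcat⟩
  · simp [hnil, pvE, pvIns, PySem.List.slice, PySem.Chars.isIn_nil]
  · rw [hcat]
    simp only [List.concat_eq_append]
    have hslice : PySem.List.slice (ys ++ [c]) (some (-1)) none = [c] := by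
      rw [PySem.List.slice_from_neg_one]
      simp
    rw [hslice]
    rw [pvE_eq_pvIns]
    simp only [List.getLast?_concat]
    by_cases hp : pvIsPunct c = true
    · have : PySem.Chars.isIn [c] pvPunct = true := by
        rw [PySem.Chars.isIn_iff_infix, List.singleton_infix_iff]
        exact (pvMem_punct_iff c).mpr hp
      simp [this, hp]
    · have : PySem.Chars.isIn [c] pvPunct = false := by
        rw [PySem.Chars.isIn_eq_false_iff, List.singleton_infix_iff]
        exact fun hm => hp ((pvMem_punct_iff c).mp hm)
      simp [this, hp]
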